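-- pv_equiv track=rewrite | github.com/shivpandey02/CodePractice | vipul_codechef/STRP.py | string_protocol
-- ===== SOURCE A (Python) =====
-- def string_protocol(string,n):
--     count = 0
--     i = 0
--     if len(string) == 0:
--         return 0
--     if len(string) == 1:
--         return 1
--     while True:
--         if string[i]==string[i+1]:
--             count+=1
--             string = string[i+2:]
--         else:
--             string = string[i+1:]
--             count+=1
--         if len(string)==0:
--             count+=0
--             return count
--         if len(string)==1:
--             count+=1
--             return count
-- ===== SOURCE B (Python) =====
-- def string_protocol(string, n):
--     # one pass over maximal runs of equal chars; each run of length k costs ceil(k/2)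
--     total = 0
--     run = 0
--     prev = None
--     for ch in string:
--         if prev is not None and ch == prev:
--             run += 1
--         else:
--             total += (run + 1) // 2
--             prev = ch
--             run = 1
--     return total + (run + 1) // 2
-- ===== Notes on version B (the rewrite author's own statement) =====
-- stated objective: simpler
-- what changed: Replaces the greedy consume-and-reslice while-loop with a single run-length pass that adds ceil(k/2) per maximal run of equal characters.
import Mathlib
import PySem

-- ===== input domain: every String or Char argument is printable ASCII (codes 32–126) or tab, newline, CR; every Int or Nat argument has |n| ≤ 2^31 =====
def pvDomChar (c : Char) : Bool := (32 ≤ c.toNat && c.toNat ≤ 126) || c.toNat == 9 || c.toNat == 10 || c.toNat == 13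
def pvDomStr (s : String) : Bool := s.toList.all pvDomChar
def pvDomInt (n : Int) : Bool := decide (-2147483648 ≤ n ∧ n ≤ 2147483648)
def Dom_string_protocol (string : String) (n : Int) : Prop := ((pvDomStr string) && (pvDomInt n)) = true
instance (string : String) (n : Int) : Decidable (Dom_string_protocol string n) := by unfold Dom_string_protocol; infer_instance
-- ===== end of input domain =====

-- B replaces A's greedy consume-and-reslice while-loop by a single run-length pass
-- adding ceil(k/2) per maximal run of equal characters (simpler, one linear pass).

-- ===== PORT A =====
-- A's while-loop: entered only with len ≥ 2; consumes 2 chars on an equal pair, else 1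
def spLoop : List Char → Int → Int
  | [], count => count          -- unreachable (loop is entered only with len ≥ 2)
  | [_], count => count         -- unreachable
  | a :: b :: rest, count =>
      let s' := if a == b then rest else b :: rest
      let count' := count + 1
      if s'.length == 0 then count'
      else if s'.length == 1 then count' + 1
      else spLoop s' count'
termination_by l _ => l.length
decreasing_by split <;> simp

def string_protocol (string : String) (n : Int) : Int :=
  let l := string.toList
  if l.length == 0 then 0
  else if l.length == 1 then 1
  else spLoop l 0

-- ===== PORT B =====
-- Source B's for-loop: prev is the current run's char (none before the first char),
-- run its length so far, total the finished runs' cost; '//' ported exactly as floordiv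
def spRuns : List Char → Option Char → Int → Int → Int
  | [], _, run, total => total + PySem.Int.floordiv (run + 1) 2
  | ch :: rest, prev, run, total =>
      if (match prev with | some p => ch == p | none => false) then
        spRuns rest prev (run + 1) total
      else
        spRuns rest (some ch) 1 (total + PySem.Int.floordiv (run + 1) 2)

def string_protocol_alt (string : String) (n : Int) : Int :=
  spRuns string.toList none 0 0

-- ===== PRECONDITION & SPEC =====
def Spec_string_protocol (string : String) (n : Int) (out : Int) : Prop := out = string_protocol_alt string n
instance (string : String) (n : Int) (out : Int) : Decidable (Spec_string_protocol string n out) := by unfold Spec_string_protocol; infer_instance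

-- ===== CLAIM (what is proved, stated in full; the proofs are below) =====
def Claim_equal_string_protocol : Prop := ∀ (string : String) (n : Int), Dom_string_protocol string n → Spec_string_protocol string n (string_protocol string n)

-- ===== LEMMAS AND PROOFS =====

-- common reference function: 1 step per leading pair (2 chars if equal, 1 otherwise)
def spF : List Char → Int
  | [] => 0
  | [_] => 1
  | a :: b :: rest => 1 + (if a == b then spF rest else spF (b :: rest))

theorem spLoop_eq_spF (l : List Char) (count : Int) (h : 2 ≤ l.length) :
    spLoop l count = count + spF l := by
  fun_induction spLoop l count
  case case1 => simp at h
  case case2 => simp at h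
  case case3 a b rest count s' count' h0 =>
    by_cases hab : (a == b) = true <;> simp_all [spF, s', count']
  case case4 a b rest count s' count' h0 h1 =>
    by_cases hab : (a == b) = true <;> simp_all [spF, s', count']
    · rcases List.length_eq_one_iff.mp h1 with ⟨c, rfl⟩
      simp [spF]; ring
    · ring
  case case5 a b rest count s' count' h0 h1 ih =>
    by_cases hab : (a == b) = true <;> simp_all [spF, s', count']
    · rw [ih (by have := List.length_pos_iff.mpr h0; have : rest.length ≠ 1 := h1; omega)]; ring
    · rw [ih (by simp [Nat.succ_le_iff, List.length_pos_iff, h1])]; ring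

theorem fdiv_cast (k : ℕ) : PySem.Int.floordiv ((k : Int) + 1) 2 = (((k + 1) / 2 : ℕ) : Int) := by
  rw [PySem.Int.floordiv_eq_ediv_of_pos (by norm_num)]
  omega

theorem spF_replicate (k : ℕ) (c : Char) :
    spF (List.replicate k c) = ((k + 1) / 2 : ℕ) := by
  induction k using Nat.strong_induction_on with
  | _ k ih =>
    match k with
    | 0 => simp [spF]
    | 1 => simp [spF]
    | (n+2) =>
      have hrep : List.replicate (n+2) c = c :: c :: List.replicate n c := by
        simp [List.replicate_succ]
      rw [hrep]
      simp only [spF, beq_self_eq_true, if_true]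
      rw [ih n (by omega)]
      push_cast
      omega

theorem spF_replicate_append (k : ℕ) (c d : Char) (rest : List Char)
    (hk : 1 ≤ k) (hd : (d == c) = false) :
    spF (List.replicate k c ++ d :: rest) = ((k + 1) / 2 : ℕ) + spF (d :: rest) := by
  induction k using Nat.strong_induction_on with
  | _ k ih =>
    match k with
    | 1 =>
      have : (c == d) = false := by simp_all [BEq.comm]
      simp [spF, this]
    | (n+2) =>
      have hrep : List.replicate (n+2) c ++ d :: rest
          = c :: c :: (List.replicate n c ++ d :: rest) := by simp [List.replicate_succ]
      rw [hrep]
      simp only [spF, beq_self_eq_true, if_true]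
      match n with
      | 0 =>
        simp [spF]
      | (m+1) =>
        rw [ih (m+1) (by omega) (by omega)]
        push_cast
        omega

theorem spRuns_inv (l : List Char) (c : Char) (k : ℕ) (total : Int) (hk : 1 ≤ k) :
    spRuns l (some c) (k : Int) total = total + spF (List.replicate k c ++ l) := by
  induction l generalizing c k total with
  | nil =>
    simp only [spRuns, List.append_nil, spF_replicate]
    rw [fdiv_cast]
  | cons d rest ih =>
    simp only [spRuns]
    by_cases hd : (d == c) = true
    · simp only [hd, if_true]
      have he : (d : Char) = c := by simpa using hd
      have h1 : ((k : Int) + 1) = ((k+1 : ℕ) : Int) := by push_cast; ring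
      rw [h1, ih c (k+1) total (by omega)]
      congr 1
      rw [he, List.replicate_succ' ]
      simp
    · simp only [hd, if_false, Bool.false_eq_true]
      have hdc : (d == c) = false := by simpa using hd
      have h2 := ih d 1 (total + PySem.Int.floordiv ((k : Int) + 1) 2) (by omega)
      simp only [Nat.cast_one] at h2
      rw [h2, spF_replicate_append k c d rest hk hdc, fdiv_cast]
      simp [List.replicate]
      ring

theorem spRuns_none (l : List Char) : spRuns l none 0 0 = spF l := by
  cases l with
  | nil => simp [spRuns, spF, PySem.Int.floordiv]
  | cons c rest =>
    simp only [spRuns]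
    have h0 : (0 : Int) + PySem.Int.floordiv (0 + 1) 2 = ((1 : ℕ) : Int) - 1 := by decide
    rw [h0]
    have := spRuns_inv rest c 1 (((1 : ℕ) : Int) - 1) (by omega)
    simp only [Nat.cast_one] at this ⊢
    rw [this]
    simp [List.replicate]

-- ===== VERDICT (by name: the statement is the Claim_ definition above) =====
theorem string_protocol_spec : Claim_equal_string_protocol := by
  intro string n _
  unfold Spec_string_protocol string_protocol string_protocol_alt
  rw [spRuns_none]
  rcases h : string.toList with _ | ⟨c, _ | ⟨d, rest⟩⟩
  · simp [spF]
  · simp [spF]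
  · have hlen : 2 ≤ (c :: d :: rest).length := by simp
    simp only [List.length_cons, beq_iff_eq]
    rw [if_neg (by omega), if_neg (by omega), spLoop_eq_spF _ 0 hlen]
    ring
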